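-- pv_equiv track=rewrite | github.com/rlawlsdn263/algorithm | 프로그래머스/0/181855. 문자열 묶기/문자열 묶기.py | solution
-- ===== SOURCE A (Python) =====
-- def solution(strArr):
--     answer = 0
--     length_dict = {}
--
--     for str in strArr:
--         str_length = len(str)
--
--         if str_length not in length_dict:
--             length_dict[str_length] = []
--
--         length_dict[str_length].append(str)
--
--     for dict in length_dict:
--         if len(length_dict[dict]) > answer:
--             answer = len(length_dict[dict])
--
--     return answer
-- ===== SOURCE B (Python) =====
-- def solution(strArr):
--     lengths = sorted(len(s) for s in strArr)
--     best = 0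
--     run = 0
--     prev = None
--     for x in lengths:
--         run = run + 1 if prev == x else 1
--         prev = x
--         if run > best:
--             best = run
--     return best
-- ===== Notes on version B (the rewrite author's own statement) =====
-- stated objective: alternative
-- what changed: B replaces A's hash-grouping (length->bucket dict, then a scan over bucket sizes) by sorting the list of lengths and making one linear pass that tracks the current run of equal consecutive values and the best run seen; the dict disappears entirely.
import Mathlib
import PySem

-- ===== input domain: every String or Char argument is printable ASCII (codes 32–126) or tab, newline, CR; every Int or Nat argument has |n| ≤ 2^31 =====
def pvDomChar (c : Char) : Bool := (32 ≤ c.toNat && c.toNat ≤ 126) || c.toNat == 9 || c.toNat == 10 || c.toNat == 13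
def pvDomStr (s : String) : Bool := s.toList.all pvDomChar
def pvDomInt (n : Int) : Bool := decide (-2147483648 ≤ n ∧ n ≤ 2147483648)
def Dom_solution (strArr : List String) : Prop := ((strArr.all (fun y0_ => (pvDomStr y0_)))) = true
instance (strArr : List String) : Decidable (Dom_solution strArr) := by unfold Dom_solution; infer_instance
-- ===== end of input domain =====

-- B sorts the lengths and finds the longest run of equal consecutive values in one pass, instead of A's dict-grouping followed by a bucket-size scan (alternative algorithm, same return value).

-- ===== PORT A =====
-- one step of A's first loop: group the string under its length
def solutionStep (d : PySem.Dict Int (List String)) (s : String) : PySem.Dict Int (List String) :=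
  let n : Int := PySem.Str.len s
  let d := if d.contains n = false then d.insert n [] else d
  d.modify n [] (fun l => l ++ [s])

def solution (strArr : List String) : Int :=
  let lengthDict : PySem.Dict Int (List String) := strArr.foldl solutionStep PySem.Dict.empty
  lengthDict.keys.foldl (fun answer k =>
    let c : Int := PySem.List.len (lengthDict.getD k [])
    if c > answer then c else answer) 0

-- ===== PORT B =====
-- one loop iteration of Source B: state is (best, run, prev)
def altStep (st : Int × Int × Option Int) (x : Int) : Int × Int × Option Int :=
  let run : Int := if st.2.2 = some x then st.2.1 + 1 else 1
  (if run > st.1 then run else st.1, run, some x)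

def solution_alt (strArr : List String) : Int :=
  let lengths : List Int := PySem.List.sorted (strArr.map (fun s => PySem.Str.len s)) (fun x => x) false
  (lengths.foldl altStep ((0 : Int), (0 : Int), (none : Option Int))).1

-- ===== PRECONDITION & SPEC =====
def Spec_solution (strArr : List String) (out : Int) : Prop := out = solution_alt strArr
instance (strArr : List String) (out : Int) : Decidable (Spec_solution strArr out) := by unfold Spec_solution; infer_instance

-- ===== CLAIM (what is proved, stated in full; the proofs are below) =====
def Claim_equal_solution : Prop := ∀ (strArr : List String), Dom_solution strArr → Spec_solution strArr (solution strArr)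

-- ===== LEMMAS AND PROOFS =====

-- ---- A-side lemmas (characterise A's result as a running max of counts over the keys) ----

theorem getD_of_not_contains (d : PySem.Dict Int (List String)) (k : Int)
    (h : d.contains k = false) : d.getD k [] = [] := by
  simp [PySem.Dict.getD, (PySem.Dict.get?_eq_none_iff_contains d k).mpr h]

theorem getD_step (d : PySem.Dict Int (List String)) (s : String) (k : Int) :
    (solutionStep d s).getD k []
      = if k = PySem.Str.len s then (d.getD k []) ++ [s] else d.getD k [] := by
  show ((if d.contains (PySem.Str.len s) = false
          then d.insert (PySem.Str.len s) [] else d).modify (PySem.Str.len s) []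
          (fun l => l ++ [s])).getD k []
      = if k = PySem.Str.len s then (d.getD k []) ++ [s] else d.getD k []
  rcases hc : d.contains (PySem.Str.len s) with _ | _
  · have h0 : d.getD (PySem.Str.len s) [] = [] := getD_of_not_contains _ _ hc
    rw [if_pos rfl, PySem.Dict.getD_modify]
    by_cases hk : k = PySem.Str.len s
    · rw [if_pos hk, if_pos hk, hk, h0, PySem.Dict.getD_insert_self]
    · rw [if_neg hk, if_neg hk, PySem.Dict.getD_insert, if_neg hk]
  · rw [if_neg (by simp), PySem.Dict.getD_modify]
    by_cases hk : k = PySem.Str.len s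
    · rw [if_pos hk, if_pos hk, hk]
    · rw [if_neg hk, if_neg hk]

theorem mem_keys_step (d : PySem.Dict Int (List String)) (s : String) (k : Int) :
    k ∈ (solutionStep d s).keys ↔ k = PySem.Str.len s ∨ k ∈ d.keys := by
  show k ∈ ((if d.contains (PySem.Str.len s) = false
          then d.insert (PySem.Str.len s) [] else d).modify (PySem.Str.len s) []
          (fun l => l ++ [s])).keys ↔ k = PySem.Str.len s ∨ k ∈ d.keys
  rcases hc : d.contains (PySem.Str.len s) with _ | _
  · rw [if_pos rfl, PySem.Dict.keys_modify]
    simp only [PySem.Dict.mem_keys_insert]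
    tauto
  · rw [if_neg (by simp), PySem.Dict.keys_modify]
    simp only [PySem.Dict.mem_keys_insert]

theorem getD_foldl_step (l : List String) (d : PySem.Dict Int (List String)) (k : Int) :
    ((l.foldl solutionStep d).getD k []).length
      = (d.getD k []).length + List.count k (l.map (fun s => PySem.Str.len s)) := by
  induction l generalizing d with
  | nil => simp
  | cons x t ih =>
      rw [List.foldl_cons, ih, getD_step, List.map_cons, List.count_cons]
      by_cases hk : k = PySem.Str.len x
      · rw [if_pos hk]
        simp only [hk, List.length_append, List.length_singleton]
        have hbeq : ((PySem.Str.len x == PySem.Str.len x)) = true := by simp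
        rw [hbeq, if_pos rfl]
        omega
      · rw [if_neg hk]
        have hbeq : ((PySem.Str.len x == k)) = false := by
          simpa using fun h => hk h.symm
        rw [hbeq, if_neg (by simp)]
        omega

theorem mem_keys_foldl_step (l : List String) (d : PySem.Dict Int (List String)) (k : Int) :
    k ∈ (l.foldl solutionStep d).keys ↔ k ∈ d.keys ∨ k ∈ l.map (fun s => PySem.Str.len s) := by
  induction l generalizing d with
  | nil => simp
  | cons x t ih =>
      rw [List.foldl_cons, ih]
      simp only [mem_keys_step, List.map_cons, List.mem_cons]
      tauto

-- ---- generic running-max lemmas ----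

theorem foldl_max_le (f : Int → Int) (l : List Int) (a m : Int)
    (ha : a ≤ m) (h : ∀ x ∈ l, f x ≤ m) :
    l.foldl (fun acc x => max acc (f x)) a ≤ m := by
  induction l generalizing a with
  | nil => exact ha
  | cons x t ih =>
      exact ih _ (max_le ha (h x (List.mem_cons_self)))
        (fun y hy => h y (List.mem_cons_of_mem _ hy))

-- a running max from 0 depends only on the SET of elements
theorem foldl_max_mem_congr (f : Int → Int) (l1 l2 : List Int)
    (h : ∀ x, x ∈ l1 ↔ x ∈ l2) :
    l1.foldl (fun acc x => max acc (f x)) 0 = l2.foldl (fun acc x => max acc (f x)) 0 := by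
  apply le_antisymm
  · exact foldl_max_le f l1 0 _ (PySem.List.le_foldl_max_int l2 f 0).1
      (fun x hx => (PySem.List.le_foldl_max_int l2 f 0).2 x ((h x).mp hx))
  · exact foldl_max_le f l2 0 _ (PySem.List.le_foldl_max_int l1 f 0).1
      (fun x hx => (PySem.List.le_foldl_max_int l1 f 0).2 x ((h x).mpr hx))

-- the extra 'max v' in the seed commutes out of a running max
theorem foldl_max_init (f : Int → Int) (l : List Int) (b v : Int) :
    l.foldl (fun acc x => max acc (f x)) (max b v)
      = max v (l.foldl (fun acc x => max acc (f x)) b) := by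
  induction l generalizing b with
  | nil => simp [max_comm]
  | cons a t ih =>
      simp only [List.foldl_cons]
      rw [show max (max b v) (f a) = max (max b (f a)) v by
            rw [max_assoc, max_assoc, max_comm v], ih]

-- ---- B-side lemmas (the run scan over a sorted list is a running max of counts) ----

theorem ite_gt_eq_max (b v : Int) : (if v > b then v else b) = max b v := by
  rw [max_def]; split_ifs <;> omega

theorem max_absorb (v c X : Int) (h1 : c ≤ X) (h2 : v ≤ c) : max v X = max c X := by
  rw [max_def, max_def]; split_ifs <;> omega

-- with prev = some x and x below everything left, the run scan is a running max of adjusted counts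
theorem altStep_foldl_some (t : List Int) (b r x : Int)
    (hs : t.Pairwise (· ≤ ·)) (hx : ∀ y ∈ t, x ≤ y) :
    (t.foldl altStep (b, r, some x)).1
      = t.foldl (fun acc y => max acc ((t.count y : Int) + if y = x then r else 0)) b := by
  induction t generalizing b r x with
  | nil => rfl
  | cons a t ih =>
      have hpw := (List.pairwise_cons.mp hs)
      have hax : x ≤ a := hx a List.mem_cons_self
      have hstep : altStep (b, r, some x) a
          = (max b (if x = a then r + 1 else 1), (if x = a then r + 1 else 1), some a) := by
        simp only [altStep, Option.some.injEq]
        rw [ite_gt_eq_max]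
      have hCa : ((a :: t).count a : Int) + (if a = x then r else 0)
          = (t.count a : Int) + (if x = a then r + 1 else 1) := by
        rw [List.count_cons_self]
        by_cases hxa : x = a
        · rw [if_pos hxa.symm, if_pos hxa]; push_cast; omega
        · rw [if_neg (fun h => hxa h.symm), if_neg hxa]; push_cast; omega
      rw [List.foldl_cons, hstep, ih _ _ a hpw.2 hpw.1, List.foldl_cons]
      have hfun : t.foldl (fun acc y => max acc (((a :: t).count y : Int) + if y = x then r else 0))
            (max b (((a :: t).count a : Int) + if a = x then r else 0))
          = t.foldl (fun acc y => max acc ((t.count y : Int) + if y = a then (if x = a then r + 1 else 1) else 0))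
            (max b (((a :: t).count a : Int) + if a = x then r else 0)) :=
        PySem.List.foldl_congr_mem _ _ _ _ (fun acc y hy => by
          have hay : a ≤ y := hpw.1 y hy
          congr 1
          by_cases hya : y = a
          · subst hya
            rw [if_pos rfl]
            exact hCa
          · have hyx : ¬ y = x := fun h => hya (by omega)
            have hay2 : ¬ a = y := fun h => hya h.symm
            simp [hya, hyx, hay2])
      rw [hfun, hCa]
      rw [foldl_max_init, foldl_max_init]
      set g : Int → Int := fun y => (t.count y : Int) + if y = a then (if x = a then r + 1 else 1) else 0 with hg
      have hga : g a = (t.count a : Int) + (if x = a then r + 1 else 1) := by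
        rw [hg]; simp
      by_cases hat : a ∈ t
      · have h1 : g a ≤ t.foldl (fun acc y => max acc (g y)) b :=
          (PySem.List.le_foldl_max_int t g b).2 a hat
        have h0 : (0 : Int) ≤ (t.count a : Int) := Int.natCast_nonneg _
        rw [hga] at h1
        exact max_absorb _ _ _ h1 (by omega)
      · rw [List.count_eq_zero.mpr hat]
        norm_num

-- starting the scan with prev = None is a plain running max of counts
theorem altStep_foldl_none (l : List Int) (b r : Int) (hs : l.Pairwise (· ≤ ·)) :
    (l.foldl altStep (b, r, none)).1
      = l.foldl (fun acc y => max acc ((l.count y : Int))) b := by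
  cases l with
  | nil => rfl
  | cons a t =>
      have hpw := (List.pairwise_cons.mp hs)
      have hstep : altStep (b, r, none) a = (max b 1, 1, some a) := by
        simp only [altStep, reduceCtorEq, if_false]
        rw [ite_gt_eq_max]
      rw [List.foldl_cons, hstep, altStep_foldl_some t (max b 1) 1 a hpw.2 hpw.1, List.foldl_cons]
      have hfun : t.foldl (fun acc y => max acc (((a :: t).count y : Int)))
            (max b (((a :: t).count a : Int)))
          = t.foldl (fun acc y => max acc ((t.count y : Int) + if y = a then (1 : Int) else 0))
            (max b (((a :: t).count a : Int))) :=
        PySem.List.foldl_congr_mem _ _ _ _ (fun acc y hy => by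
          congr 1
          by_cases hya : y = a
          · subst hya
            rw [List.count_cons_self, if_pos rfl]
            push_cast; omega
          · have hay2 : ¬ a = y := fun h => hya h.symm
            simp [hya, hay2])
      rw [hfun]
      have hCa : ((a :: t).count a : Int) = (t.count a : Int) + 1 := by
        rw [List.count_cons_self]; push_cast; omega
      rw [hCa, foldl_max_init, foldl_max_init]
      set g : Int → Int := fun y => (t.count y : Int) + if y = a then (1 : Int) else 0 with hg
      have hga : g a = (t.count a : Int) + 1 := by rw [hg]; simp
      by_cases hat : a ∈ t
      · have h1 : g a ≤ t.foldl (fun acc y => max acc (g y)) b :=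
          (PySem.List.le_foldl_max_int t g b).2 a hat
        have h0 : (0 : Int) ≤ (t.count a : Int) := Int.natCast_nonneg _
        rw [hga] at h1
        exact max_absorb _ _ _ h1 (by omega)
      · rw [List.count_eq_zero.mpr hat]
        norm_num

-- ===== VERDICT (by name: the statement is the Claim_ definition above) =====
theorem solution_spec : Claim_equal_solution := by
  intro strArr _
  show (List.foldl solutionStep PySem.Dict.empty strArr).keys.foldl
      (fun answer k =>
        if PySem.List.len ((List.foldl solutionStep PySem.Dict.empty strArr).getD k []) > answer
        then PySem.List.len ((List.foldl solutionStep PySem.Dict.empty strArr).getD k [])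
        else answer) 0
    = (((PySem.List.sorted (strArr.map (fun s => PySem.Str.len s)) (fun x => x) false)).foldl
        altStep ((0 : Int), (0 : Int), (none : Option Int))).1
  set lens := strArr.map (fun s => PySem.Str.len s) with hlens
  set slens := PySem.List.sorted lens (fun x => x) false with hslens
  have hperm : slens.Perm lens := PySem.List.sorted_perm _ _ _
  have hpw : slens.Pairwise (· ≤ ·) := by
    have := PySem.List.sorted_pairwise lens (fun x => x) (κ := Int)
    simpa [hslens] using this
  rw [altStep_foldl_none slens 0 0 hpw]
  have hA : (List.foldl solutionStep PySem.Dict.empty strArr).keys.foldl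
      (fun answer k =>
        if PySem.List.len ((List.foldl solutionStep PySem.Dict.empty strArr).getD k []) > answer
        then PySem.List.len ((List.foldl solutionStep PySem.Dict.empty strArr).getD k [])
        else answer) 0
      = (List.foldl solutionStep PySem.Dict.empty strArr).keys.foldl
          (fun acc k => max acc ((lens.count k : Int))) 0 :=
    PySem.List.foldl_congr_mem _ _ _ _ (fun acc k _ => by
      have hlen := getD_foldl_step strArr PySem.Dict.empty k
      simp only [PySem.Dict.getD_empty, List.length_nil, Nat.zero_add] at hlen
      simp only [PySem.List.len, hlen, hlens]
      rw [ite_gt_eq_max])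
  have hB : slens.foldl (fun acc y => max acc ((slens.count y : Int))) 0
      = slens.foldl (fun acc y => max acc ((lens.count y : Int))) 0 :=
    PySem.List.foldl_congr_mem _ _ _ _ (fun acc y _ => by
      rw [hperm.count_eq])
  rw [hA, hB]
  apply foldl_max_mem_congr
  intro x
  rw [mem_keys_foldl_step, hperm.mem_iff]
  simp [hlens]
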